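-- pv_equiv track=rewrite | github.com/leleoics/projeto_final | apps/satelites.py | image_filter
-- ===== SOURCE A (Python) =====
-- def image_filter(datas, list):
--     Ids = []
--     for value in datas:
--         year = value[-4:]
--         month = value[-7:-5]
--         day = value[-10:-8]
--         date = year + month + day
--         for value2 in list:
--             if date in value2:
--                 Ids.append(value2)
--     return Ids
-- ===== SOURCE B (Python) =====
-- def image_filter(datas, list):
--     cache = {}
--     out = []
--     for value in datas:
--         date = value[-4:] + value[-7:-5] + value[-10:-8]
--         if date not in cache:
--             cache[date] = [v2 for v2 in list if date in v2]
--         out += cache[date]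
--     return out
-- ===== Notes on version B (the rewrite author's own statement) =====
-- stated objective: alternative
-- what changed: B memoizes the per-date filter result in a dict keyed by the reformatted date, so each distinct date scans list only once, and builds that result with a single comprehension instead of repeated appends.
import Mathlib
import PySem

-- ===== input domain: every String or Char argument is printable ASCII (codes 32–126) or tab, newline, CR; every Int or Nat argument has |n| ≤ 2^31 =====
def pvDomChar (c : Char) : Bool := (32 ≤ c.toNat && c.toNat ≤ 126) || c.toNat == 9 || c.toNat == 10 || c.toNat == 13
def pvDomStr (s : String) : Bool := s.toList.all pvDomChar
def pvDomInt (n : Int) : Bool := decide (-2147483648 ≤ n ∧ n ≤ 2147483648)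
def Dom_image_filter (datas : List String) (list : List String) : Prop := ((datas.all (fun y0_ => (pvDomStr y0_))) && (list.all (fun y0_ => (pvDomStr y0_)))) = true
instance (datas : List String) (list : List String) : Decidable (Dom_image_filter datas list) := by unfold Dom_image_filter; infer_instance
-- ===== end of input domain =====

-- B memoizes the per-date filter in a dict; equivalence is proved for the return value only (no argument is mutated).

-- shared helper: date = value[-4:] + value[-7:-5] + value[-10:-8] (both Pythons compute it identically)
def pvDateOf (value : String) : String :=
  PySem.Str.slice value (some (-4)) none
    ++ PySem.Str.slice value (some (-7)) (some (-5))
    ++ PySem.Str.slice value (some (-10)) (some (-8))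

-- ===== PORT A =====
def image_filter (datas : List String) (list : List String) : List String :=
  datas.foldl (fun Ids value =>
    let date := pvDateOf value
    list.foldl (fun Ids value2 =>
      if PySem.Str.isIn date value2 then Ids ++ [value2] else Ids) Ids) []

-- ===== PORT B =====
def image_filter_alt (datas : List String) (list : List String) : List String :=
  (datas.foldl (fun (st : PySem.Dict String (List String) × List String) value =>
      let date := pvDateOf value
      let cache := if st.1.contains date then st.1
                   else st.1.insert date (list.filter (fun v2 => PySem.Str.isIn date v2))
      (cache, st.2 ++ cache.getD date []))
    (PySem.Dict.empty, [])).2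

-- ===== PRECONDITION & SPEC =====
def Spec_image_filter (datas : List String) (list : List String) (out : List String) : Prop := out = image_filter_alt datas list
instance (datas : List String) (list : List String) (out : List String) : Decidable (Spec_image_filter datas list out) := by unfold Spec_image_filter; infer_instance

-- ===== CLAIM (what is proved, stated in full; the proofs are below) =====
def Claim_equal_image_filter : Prop := ∀ (datas : List String) (list : List String), Dom_image_filter datas list → Spec_image_filter datas list (image_filter datas list)

-- ===== LEMMAS AND PROOFS =====

-- the filter result B caches per date
def pvF (list : List String) (date : String) : List String :=
  list.filter (fun v2 => PySem.Str.isIn date v2)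

-- A's inner loop is acc ++ filter
theorem image_filter_eq_canon (datas list : List String) :
    image_filter datas list
      = datas.foldl (fun acc v => acc ++ pvF list (pvDateOf v)) [] := by
  unfold image_filter pvF
  congr 1
  funext Ids value
  exact PySem.List.foldl_append_if_eq_filter _ list Ids

-- B's loop: provided every cached entry is the true filter result, the
-- accumulator ends as out ++ the concatenation of the per-date filters.
theorem alt_loop_eq (list : List String) (datas : List String)
    (cache : PySem.Dict String (List String)) (out : List String)
    (h : ∀ k, cache.contains k = true → cache.getD k [] = pvF list k) :
    (datas.foldl (fun (st : PySem.Dict String (List String) × List String) value =>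
        let date := pvDateOf value
        let cache := if st.1.contains date then st.1
                     else st.1.insert date (pvF list date)
        (cache, st.2 ++ cache.getD date []))
      (cache, out)).2
    = datas.foldl (fun acc v => acc ++ pvF list (pvDateOf v)) out := by
  induction datas generalizing cache out with
  | nil => rfl
  | cons v rest ih =>
    simp only [List.foldl_cons]
    by_cases hc : cache.contains (pvDateOf v) = true
    · rw [if_pos hc]
      rw [ih cache (out ++ cache.getD (pvDateOf v) []) h, h _ hc]
    · rw [if_neg hc]
      have hins : ∀ k, ((cache.insert (pvDateOf v) (pvF list (pvDateOf v))).contains k = true) →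
          (cache.insert (pvDateOf v) (pvF list (pvDateOf v))).getD k [] = pvF list k := by
        intro k hk
        by_cases hkv : k = pvDateOf v
        · subst hkv; rw [PySem.Dict.getD_insert_self]
        · rw [PySem.Dict.getD_insert_of_ne _ _ _ hkv]
          rw [PySem.Dict.contains_insert] at hk
          simp only [Bool.or_eq_true, beq_iff_eq] at hk
          exact h k (hk.resolve_left hkv)
      rw [ih _ _ hins, PySem.Dict.getD_insert_self]

theorem image_filter_alt_eq_canon (datas list : List String) :
    image_filter_alt datas list
      = datas.foldl (fun acc v => acc ++ pvF list (pvDateOf v)) [] := by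
  unfold image_filter_alt
  exact alt_loop_eq list datas PySem.Dict.empty []
    (fun k hk => by simp [PySem.Dict.contains_empty] at hk)

-- ===== VERDICT (by name: the statement is the Claim_ definition above) =====
theorem image_filter_spec : Claim_equal_image_filter := by
  intro datas list _
  unfold Spec_image_filter
  rw [image_filter_eq_canon, image_filter_alt_eq_canon]
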